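-- pv_equiv track=rewrite | github.com/yonsweng/ps | codeforces/1612/c.py | solve
-- ===== SOURCE A (Python) =====
-- def n_emotes(m, k):
--     if m <= k:
--         return m * (m + 1) // 2
--     else:
--         return k * (k + 1) // 2 + (m - k) * (3 * k - m - 1) // 2
--
-- def solve(k, x):
--     low, high = 0, 2 * k - 1
--
--     while low <= high:
--         m = (low + high) // 2
--
--         if n_emotes(m, k) >= x:
--             high = m - 1
--         else:
--             low = m + 1
--
--     return min(low, 2 * k - 1)
-- ===== SOURCE B (Python) =====
-- def _isqrt(n):
--     # Newton's method (same scheme as math.isqrt / Lean's Nat.sqrt); n >= 0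
--     if n <= 1:
--         return n
--     g = n // 2
--     while True:
--         nxt = (g + n // g) // 2
--         if nxt < g:
--             g = nxt
--         else:
--             return g
--
--
-- def solve(k, x):
--     cap = 2 * k - 1
--     if x <= 0:
--         return min(0, cap)
--     tc2 = k * (k + 1)          # twice the triangular cap n_emotes(k, k)
--     if 2 * x <= tc2:
--         # least m with m*(m+1) >= 2*x, via integer sqrt
--         t = _isqrt(2 * x)
--         m = t if t * (t + 1) >= 2 * x else t + 1
--         return min(m, cap)
--     # second phase: least j >= 1 with j*(2*k-1-j) >= 2*x - tc2
--     y = 2 * x - tc2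
--     d = (2 * k - 1) * (2 * k - 1) - 4 * y
--     if d < 0:
--         return cap
--     j = max((2 * k - _isqrt(d)) // 2, 1)
--     return min(k + j, cap)
-- ===== Notes on version B (the rewrite author's own statement) =====
-- stated objective: alternative
-- what changed: Replaces the binary search over [0, 2k-1] with a closed-form solution: each phase's quadratic inequality is inverted exactly with a hand-written Newton integer square root, so no search over candidate m remains.
import Mathlib
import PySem

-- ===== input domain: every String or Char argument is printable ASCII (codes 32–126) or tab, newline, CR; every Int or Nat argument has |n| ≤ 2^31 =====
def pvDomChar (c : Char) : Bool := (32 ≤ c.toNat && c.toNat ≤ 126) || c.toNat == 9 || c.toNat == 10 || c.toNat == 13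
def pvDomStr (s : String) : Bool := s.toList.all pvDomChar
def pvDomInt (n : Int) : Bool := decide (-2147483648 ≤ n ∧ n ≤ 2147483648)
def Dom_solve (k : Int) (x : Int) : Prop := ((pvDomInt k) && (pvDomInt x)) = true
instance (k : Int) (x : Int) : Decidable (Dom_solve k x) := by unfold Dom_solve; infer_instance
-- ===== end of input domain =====

-- B replaces A's binary search over [0, 2k-1] by a closed-form inversion of each phase's
-- quadratic using a hand-written Newton integer square root (alternative algorithm, same cost class).


-- ===== PORT A =====
def n_emotes (m : Int) (k : Int) : Int :=
  if m ≤ k then PySem.Int.floordiv (m * (m + 1)) 2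
  else PySem.Int.floordiv (k * (k + 1)) 2 + PySem.Int.floordiv ((m - k) * (3 * k - m - 1)) 2

def solveLoop (k : Int) (x : Int) (low : Int) (high : Int) : Int :=
  if low ≤ high then
    let m := PySem.Int.floordiv (low + high) 2
    if n_emotes m k ≥ x then solveLoop k x low (m - 1) else solveLoop k x (m + 1) high
  else low
termination_by (high + 1 - low).toNat
decreasing_by
  · have h := PySem.Int.floordiv_two_mid_bounds (by assumption : low ≤ high)
    omega
  · have h := PySem.Int.floordiv_two_mid_bounds (by assumption : low ≤ high)
    omega

def solve (k : Int) (x : Int) : Int := min (solveLoop k x 0 (2 * k - 1)) (2 * k - 1)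

-- ===== PORT B =====
-- Newton iteration of Source B's _isqrt; the '0 ≤ nxt' conjunct is a totality guard only
-- (on every state the Python loop reaches, nxt is nonnegative, so the test is Python's 'nxt < g').
def isqrtLoop (n : Int) (g : Int) : Int :=
  let nxt := PySem.Int.floordiv (g + PySem.Int.floordiv n g) 2
  if _h : 0 ≤ nxt ∧ nxt < g then isqrtLoop n nxt else g
termination_by g.toNat
decreasing_by omega

def pyIsqrt (n : Int) : Int :=
  if n ≤ 1 then n else isqrtLoop n (PySem.Int.floordiv n 2)

def solve_alt (k : Int) (x : Int) : Int :=
  let cap := 2 * k - 1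
  if x ≤ 0 then min 0 cap
  else
    let tc2 := k * (k + 1)
    if 2 * x ≤ tc2 then
      let t := pyIsqrt (2 * x)
      let m := if t * (t + 1) ≥ 2 * x then t else t + 1
      min m cap
    else
      let y := 2 * x - tc2
      let d := (2 * k - 1) * (2 * k - 1) - 4 * y
      if d < 0 then cap
      else
        let j := max (PySem.Int.floordiv (2 * k - pyIsqrt d) 2) 1
        min (k + j) cap

-- ===== PRECONDITION & SPEC =====
def Spec_solve (k : Int) (x : Int) (out : Int) : Prop := out = solve_alt k x
instance (k : Int) (x : Int) (out : Int) : Decidable (Spec_solve k x out) := by unfold Spec_solve; infer_instance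

-- ===== CLAIM (what is proved, stated in full; the proofs are below) =====
def Claim_equal_solve : Prop := ∀ (k : Int) (x : Int), Dom_solve k x → Spec_solve k x (solve k x)

-- ===== LEMMAS AND PROOFS =====

-- Happy k x m: "m emotes reach happiness x", the predicate A binary-searches
def Happy (k : Int) (x : Int) (m : Int) : Prop := x ≤ n_emotes m k

def Post (k : Int) (x : Int) (L : Int) : Prop :=
  (∀ m, 0 ≤ m → m < L → ¬ Happy k x m) ∧ (∀ m, L ≤ m → m ≤ 2 * k - 1 → Happy k x m) ∧
  0 ≤ L ∧ L ≤ 2 * k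

lemma two_n_emotes_le {m k : Int} (h : m ≤ k) : 2 * n_emotes m k = m * (m + 1) := by
  rw [n_emotes, if_pos h, PySem.Int.floordiv_eq_ediv_of_pos (by norm_num)]
  exact Int.mul_ediv_cancel' (Int.even_mul_succ_self m).two_dvd

lemma two_n_emotes_gt {m k : Int} (h : k < m) :
    2 * n_emotes m k = k * (k + 1) + (m - k) * (3 * k - m - 1) := by
  have h2 : Even ((m - k) * (3 * k - m - 1)) := by
    rcases Int.even_or_odd (m - k) with he | ho
    · exact he.mul_right _
    · obtain ⟨t, ht⟩ := ho
      have : Even (3 * k - m - 1) := ⟨k - t - 1, by omega⟩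
      exact this.mul_left _
  rw [n_emotes, if_neg (by omega), PySem.Int.floordiv_eq_ediv_of_pos (by norm_num),
    PySem.Int.floordiv_eq_ediv_of_pos (by norm_num), mul_add,
    Int.mul_ediv_cancel' (Int.even_mul_succ_self k).two_dvd, Int.mul_ediv_cancel' h2.two_dvd]

lemma n_emotes_step {k a : Int} (hk : 1 ≤ k) (h0 : 0 ≤ a) (h1 : a + 1 ≤ 2 * k - 1) :
    n_emotes a k ≤ n_emotes (a + 1) k := by
  by_cases hle : a + 1 ≤ k
  · have e1 := two_n_emotes_le (show a ≤ k by omega)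
    have e2 := two_n_emotes_le hle
    nlinarith
  · have hgt : k < a + 1 := by omega
    by_cases hak : a ≤ k
    · have e1 := two_n_emotes_le hak
      have e2 := two_n_emotes_gt hgt
      have : a = k := by omega
      subst this
      nlinarith
    · have e1 := two_n_emotes_gt (by omega : k < a)
      have e2 := two_n_emotes_gt (by omega : k < a + 1)
      nlinarith

lemma n_emotes_mono {k : Int} (hk : 1 ≤ k) {a b : Int} (h0 : 0 ≤ a) (hab : a ≤ b)
    (hb : b ≤ 2 * k - 1) : n_emotes a k ≤ n_emotes b k := by
  obtain ⟨n, hn⟩ : ∃ n : Nat, b = a + n := ⟨(b - a).toNat, by omega⟩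
  subst hn
  induction n with
  | zero => simp
  | succ n ih =>
    have : (n : Int) + 1 = (n + 1 : Nat) := by push_cast; ring
    calc n_emotes a k ≤ n_emotes (a + n) k := ih (by push_cast at hb ⊢; omega) (by omega)
      _ ≤ n_emotes (a + n + 1) k := n_emotes_step hk (by omega) (by push_cast at hb; omega)
      _ = n_emotes (a + (n + 1 : Nat)) k := by push_cast; ring_nf

lemma happy_mono {k x : Int} (hk : 1 ≤ k) {a b : Int} (h0 : 0 ≤ a) (hab : a ≤ b)
    (hb : b ≤ 2 * k - 1) (ha : Happy k x a) : Happy k x b :=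
  le_trans ha (n_emotes_mono hk h0 hab hb)

lemma not_happy_of_le_k {k x m : Int} (hm0 : 0 ≤ m) (hmk : m ≤ k) (hx : k * (k + 1) < 2 * x) :
    ¬ Happy k x m := by
  intro hh
  have e := two_n_emotes_le hmk
  have h1 : m * (m + 1) ≤ k * (k + 1) := by nlinarith
  have h2 : x ≤ n_emotes m k := hh
  linarith

lemma happy_iff_phase2 {k x m : Int} (hm : k < m) :
    Happy k x m ↔ (2 * (m - k) - (2 * k - 1)) * (2 * (m - k) - (2 * k - 1))
      ≤ (2 * k - 1) * (2 * k - 1) - 4 * (2 * x - k * (k + 1)) := by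
  have e := two_n_emotes_gt hm
  unfold Happy
  constructor <;> intro h <;> nlinarith

lemma sq_gt_of_le_neg {a r d : Int} (hr : 0 ≤ r) (h1 : a ≤ -(r + 1)) (h2 : d < (r + 1) * (r + 1)) :
    ¬ a * a ≤ d := by
  intro hcon
  have h3 : r + 1 ≤ -a := by linarith
  have h4 : (r + 1) * (r + 1) ≤ -a * -a := mul_le_mul h3 h3 (by linarith) (by linarith)
  have h5 : -a * -a = a * a := by ring
  linarith

lemma sq_le_of_bounds {a r d : Int} (h1 : -r ≤ a) (h2 : a ≤ -1) (h3 : r * r ≤ d) :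
    a * a ≤ d := by
  have h4 : -a * -a ≤ r * r := mul_le_mul (by linarith) (by linarith) (by linarith) (by linarith)
  have h5 : -a * -a = a * a := by ring
  linarith

lemma loop_post {k x : Int} (hk : 1 ≤ k) :
    ∀ N : Nat, ∀ low high : Int, (high + 1 - low).toNat = N → 0 ≤ low → high ≤ 2 * k - 1 → low ≤ high + 1 →
    (∀ m, 0 ≤ m → m < low → ¬ Happy k x m) →
    (∀ m, high < m → m ≤ 2 * k - 1 → Happy k x m) →
    Post k x (solveLoop k x low high) := by
  intro N
  induction N using Nat.strong_induction_on with
  | _ N ih =>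
    intro low high hN h0 hhi hlh hleft hright
    rw [solveLoop]
    by_cases hc : low ≤ high
    · rw [if_pos hc]
      have hmid := PySem.Int.floordiv_two_mid_bounds hc
      obtain ⟨hm1, hm2⟩ := hmid
      set m := PySem.Int.floordiv (low + high) 2 with hm
      by_cases hx : n_emotes m k ≥ x
      · rw [if_pos hx]
        exact ih (m - low).toNat (by omega) low (m - 1) (by omega) h0 (by omega) (by omega)
          hleft (fun m' hm' hm'2 => by
            by_cases hmh : high < m'
            · exact hright m' hmh hm'2
            · exact le_trans hx (n_emotes_mono hk (by omega) (by omega : m ≤ m') hm'2)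
            )
      · rw [if_neg hx]
        exact ih (high + 1 - (m + 1)).toNat (by omega) (m + 1) high (by omega) (by omega) hhi (by omega)
          (fun m' hm' hm'2 => by
            by_cases hml : m' < low
            · exact hleft m' hm' hml
            · intro hh
              exact hx (le_trans hh (n_emotes_mono hk hm' (by omega : m' ≤ m) (by omega)))
            )
          hright
    · rw [if_neg hc]
      exact ⟨hleft, fun m' hm' hm'2 => hright m' (by omega) hm'2, h0, by omega⟩

lemma post_unique {k x L1 L2 : Int} (h1 : Post k x L1) (h2 : Post k x L2) : L1 = L2 := by
  rcases h1 with ⟨a1, b1, c1, d1⟩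
  rcases h2 with ⟨a2, b2, c2, d2⟩
  by_contra hne
  rcases lt_or_gt_of_ne hne with h | h
  · by_cases hL : L1 < 2 * k
    · exact a2 L1 c1 h (b1 L1 le_rfl (by omega))
    · omega
  · by_cases hL : L2 < 2 * k
    · exact a1 L2 c2 h (b2 L2 le_rfl (by omega))
    · omega

lemma isqrtLoop_eq {n : Int} (hn : 0 ≤ n) :
    ∀ G : Nat, ∀ g : Int, g.toNat = G → 0 ≤ g →
    isqrtLoop n g = ((Nat.sqrt.iter n.toNat G : Nat) : Int) := by
  intro G
  induction G using Nat.strong_induction_on with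
  | _ G ih =>
    intro g hG hg
    rw [isqrtLoop, Nat.sqrt.iter]
    rcases eq_or_lt_of_le hg with h0 | h1
    · have hg0 : g = 0 := h0.symm
      have hG0 : G = 0 := by omega
      subst hg0; subst hG0
      simp only [PySem.Int.floordiv]
      norm_num
    · have hgn : g = ((G : Nat) : Int) := by omega
      have hnn : n = ((n.toNat : Nat) : Int) := by omega
      have hfd : PySem.Int.floordiv n g = ((n.toNat / G : Nat) : Int) := by
        conv_lhs => rw [hnn, hgn]
        exact_mod_cast PySem.Int.floordiv_natCast n.toNat G
      have hnxt : PySem.Int.floordiv (g + PySem.Int.floordiv n g) 2 = (((G + n.toNat / G) / 2 : Nat) : Int) := by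
        rw [hfd, hgn]
        exact_mod_cast PySem.Int.floordiv_natCast (G + n.toNat / G) 2
      simp only [hnxt]
      by_cases hlt : (G + n.toNat / G) / 2 < G
      · rw [dif_pos ⟨Int.natCast_nonneg _, by rw [hgn]; exact_mod_cast hlt⟩, dif_pos hlt]
        exact ih _ hlt (((G + n.toNat / G) / 2 : Nat) : Int) (Int.toNat_natCast _) (Int.natCast_nonneg _)
      · rw [dif_neg (fun hcon => hlt (by rw [hgn] at hcon; exact_mod_cast hcon.2)), dif_neg hlt]
        exact hgn

lemma isqrt_spec {n : Int} (hn : 0 ≤ n) :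
    0 ≤ pyIsqrt n ∧ pyIsqrt n * pyIsqrt n ≤ n ∧ n < (pyIsqrt n + 1) * (pyIsqrt n + 1) := by
  by_cases h1 : n ≤ 1
  · have : n = 0 ∨ n = 1 := by omega
    rcases this with h | h <;> subst h <;> norm_num [pyIsqrt]
  · rw [pyIsqrt, if_neg h1]
    have hfd : PySem.Int.floordiv n 2 = ((n.toNat / 2 : Nat) : Int) := by
      conv_lhs => rw [show n = ((n.toNat : Nat) : Int) by omega]
      exact_mod_cast PySem.Int.floordiv_natCast n.toNat 2
    rw [hfd, isqrtLoop_eq hn _ _ (Int.toNat_natCast _) (Int.natCast_nonneg _)]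
    have hsq := Nat.sqrt.iter_sq_le n.toNat (n.toNat / 2)
    have hpre : n.toNat < (n.toNat / 2 + 1) * (n.toNat / 2 + 1) := by
      have h2 : 2 ≤ n.toNat := by omega
      have hq1 : 1 ≤ n.toNat / 2 := by omega
      have hq2 : n.toNat ≤ 2 * (n.toNat / 2) + 1 := by omega
      nlinarith
    have hup := Nat.sqrt.lt_iter_succ_sq n.toNat (n.toNat / 2) hpre
    set R := Nat.sqrt.iter n.toNat (n.toNat / 2) with hR
    have c1 : ((R : Int)) * R ≤ n := by
      have : ((R * R : Nat) : Int) ≤ ((n.toNat : Nat) : Int) := by exact_mod_cast hsq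
      push_cast at this; omega
    have c2 : n < ((R : Int) + 1) * (R + 1) := by
      have : ((n.toNat : Nat) : Int) < (((R + 1) * (R + 1) : Nat) : Int) := by exact_mod_cast hup
      push_cast at this; omega
    exact ⟨Int.natCast_nonneg _, c1, c2⟩

lemma alt_post {k x : Int} (hk : 1 ≤ k) :
    ∃ v, Post k x v ∧ solve_alt k x = min v (2 * k - 1) := by
  by_cases hx0 : x ≤ 0
  · refine ⟨0, ⟨fun m h0 hlt => by omega, fun m hge hle => ?_, le_rfl, by omega⟩, ?_⟩
    · show x ≤ n_emotes m k
      by_cases hmk : m ≤ k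
      · have e := two_n_emotes_le hmk
        nlinarith
      · have e := two_n_emotes_gt (by omega : k < m)
        have h1 : 1 ≤ m - k := by omega
        have h2 : 1 ≤ 3 * k - m - 1 := by omega
        nlinarith
    · simp only [solve_alt, if_pos hx0]
  · by_cases hxc : 2 * x ≤ k * (k + 1)
    · obtain ⟨ht0, ht1, ht2⟩ := isqrt_spec (show (0:Int) ≤ 2 * x by omega)
      set t := pyIsqrt (2 * x) with htdef
      set m := if t * (t + 1) ≥ 2 * x then t else t + 1 with hm
      have key : 2 * x ≤ m * (m + 1) ∧ (m - 1) * m < 2 * x ∧ 1 ≤ m := by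
        by_cases hc : t * (t + 1) ≥ 2 * x
        · rw [hm, if_pos hc]
          have ht : 1 ≤ t := by nlinarith
          exact ⟨hc, by nlinarith, ht⟩
        · rw [hm, if_neg hc]
          push Not at hc
          exact ⟨by nlinarith, by nlinarith, by omega⟩
      obtain ⟨k1, k2, k3⟩ := key
      have hmk : m ≤ k := by nlinarith
      refine ⟨m, ⟨fun m' h0 hlt => ?_, fun m' hge hle => ?_, by omega, by omega⟩, ?_⟩
      · intro hh
        have e := two_n_emotes_le (show m' ≤ k by omega)
        have h1 : m' * (m' + 1) ≤ (m - 1) * m := by nlinarith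
        have h2 : 2 * x ≤ 2 * n_emotes m' k := by
          show 2 * x ≤ 2 * n_emotes m' k
          have : x ≤ n_emotes m' k := hh
          omega
        omega
      · apply happy_mono hk (by omega) hge hle
        show x ≤ n_emotes m k
        have e := two_n_emotes_le hmk
        omega
      · simp only [solve_alt, if_neg hx0, if_pos hxc]
        rw [← htdef, ← hm]
    · push Not at hxc
      have hy1 : 1 ≤ 2 * x - k * (k + 1) := by omega
      by_cases hdneg : (2 * k - 1) * (2 * k - 1) - 4 * (2 * x - k * (k + 1)) < 0
      · refine ⟨2 * k, ⟨fun m h0 hlt => ?_, fun m hge hle => by omega, by omega, le_rfl⟩, ?_⟩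
        · by_cases hmk : m ≤ k
          · exact not_happy_of_le_k h0 hmk hxc
          · rw [happy_iff_phase2 (by omega : k < m)]
            intro hcon
            nlinarith
        · rw [min_eq_right (by omega : 2 * k - 1 ≤ 2 * k)]
          simp only [solve_alt, if_neg hx0, if_neg (by omega : ¬ 2 * x ≤ k * (k + 1)), if_pos hdneg]
      · push Not at hdneg
        obtain ⟨hr0, hr1, hr2⟩ := isqrt_spec hdneg
        set d := (2 * k - 1) * (2 * k - 1) - 4 * (2 * x - k * (k + 1)) with hddef
        set r := pyIsqrt d with hrdef
        have hd4 : d = 4 * (k * k - k - (2 * x - k * (k + 1))) + 1 := by rw [hddef]; ring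
        have hd1 : 1 ≤ d := by omega
        have hrpos : 1 ≤ r := by nlinarith
        have hrc : r ≤ 2 * k - 2 := by nlinarith
        have hqm := PySem.Int.floordiv_mul_add_mod (2 * k - r) 2
        have hqlo := PySem.Int.mod_nonneg (2 * k - r) (show (0:Int) < 2 by norm_num)
        have hqhi := PySem.Int.mod_lt (2 * k - r) (show (0:Int) < 2 by norm_num)
        set q := PySem.Int.floordiv (2 * k - r) 2 with hqdef
        have hq1 : 1 ≤ q := by omega
        have hjq : max q 1 = q := max_eq_left hq1
        refine ⟨k + q, ⟨fun m h0 hlt => ?_, fun m hge hle => ?_, by omega, by omega⟩, ?_⟩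
        · by_cases hmk : m ≤ k
          · exact not_happy_of_le_k h0 hmk hxc
          · rw [happy_iff_phase2 (by omega : k < m)]
            exact sq_gt_of_le_neg hr0 (by omega) hr2
        · rw [happy_iff_phase2 (by omega : k < m)]
          exact sq_le_of_bounds (by omega) (by omega) hr1
        · simp only [solve_alt, if_neg hx0, if_neg (by omega : ¬ 2 * x ≤ k * (k + 1)),
            if_neg (by omega : ¬ d < 0), ← hddef, ← hrdef, ← hqdef, hjq]

-- ===== VERDICT (by name: the statement is the Claim_ definition above) =====
theorem solve_spec : Claim_equal_solve := by
  intro k x _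
  unfold Spec_solve
  by_cases hk : k ≤ 0
  · have hA : solve k x = 2 * k - 1 := by
      rw [solve, solveLoop, if_neg (by omega : ¬ (0:Int) ≤ 2 * k - 1)]
      exact min_eq_right (by omega)
    have hB : solve_alt k x = 2 * k - 1 := by
      by_cases hx0 : x ≤ 0
      · simp only [solve_alt, if_pos hx0]
        exact min_eq_right (by omega)
      · by_cases hxc : 2 * x ≤ k * (k + 1)
        · simp only [solve_alt, if_neg hx0, if_pos hxc]
          have ht0 : 0 ≤ pyIsqrt (2 * x) := (isqrt_spec (by omega : (0:Int) ≤ 2 * x)).1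
          apply min_eq_right
          split_ifs <;> omega
        · by_cases hd : (2 * k - 1) * (2 * k - 1) - 4 * (2 * x - k * (k + 1)) < 0
          · simp only [solve_alt, if_neg hx0, if_neg hxc, if_pos hd]
          · simp only [solve_alt, if_neg hx0, if_neg hxc, if_neg hd]
            have h1 := le_max_right (PySem.Int.floordiv (2 * k - pyIsqrt ((2 * k - 1) * (2 * k - 1) - 4 * (2 * x - k * (k + 1)))) 2) (1:Int)
            exact min_eq_right (by omega)
    rw [hA, hB]
  · have hk1 : 1 ≤ k := by omega
    obtain ⟨v, hv, hB⟩ := alt_post (x := x) hk1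
    have hA : Post k x (solveLoop k x 0 (2 * k - 1)) := by
      apply loop_post hk1 ((2 * k).toNat) 0 (2 * k - 1) (by omega) le_rfl le_rfl (by omega)
      · intro m hm hm'; omega
      · intro m hm hm'; omega
    rw [solve, hB, post_unique hA hv]
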